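-- pv_equiv track=rewrite | github.com/ericmerle3789/Collatz-Junction-Theorem | scripts/research/r49_acal_within.py | compute_S
-- ===== SOURCE A (Python) =====
-- from math import comb, gcd, ceil, log2, sqrt, log
--
-- def compute_S(k):
--     """Minimal S such that 2^S > 3^k. Exact via integer comparison."""
--     S = ceil(k * log2(3))
--     three_k = 3 ** k
--     while (1 << S) <= three_k:
--         S += 1
--     while S > 0 and (1 << (S - 1)) > three_k:
--         S -= 1
--     return S
-- ===== SOURCE B (Python) =====
-- def compute_S(k):
--     """Minimal S such that 2^S > 3^k. Exact via integer comparison."""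
--     return (3 ** k).bit_length()
-- ===== Notes on version B (the rewrite author's own statement) =====
-- stated objective: simpler
-- what changed: Replaces the float ceil(k*log2(3)) seed and the two correcting while-loops by a single exact int.bit_length() call on 3**k (the least S with 2^S > n is n.bit_length() since 3**k is never a power of two for k>=1 and k=0 gives 1).
import Mathlib
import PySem

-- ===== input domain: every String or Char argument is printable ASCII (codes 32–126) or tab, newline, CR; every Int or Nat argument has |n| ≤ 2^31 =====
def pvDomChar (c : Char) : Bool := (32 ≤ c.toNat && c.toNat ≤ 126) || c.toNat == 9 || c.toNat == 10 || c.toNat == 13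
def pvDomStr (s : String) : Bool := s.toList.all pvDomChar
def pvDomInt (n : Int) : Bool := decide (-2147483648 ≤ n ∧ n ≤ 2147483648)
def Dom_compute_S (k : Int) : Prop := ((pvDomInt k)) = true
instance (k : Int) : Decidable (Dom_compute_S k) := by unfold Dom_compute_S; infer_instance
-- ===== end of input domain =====

-- B drops A's float ceil(k*log2(3)) seed and both correcting while-loops for one exact
-- int.bit_length() call on 3**k; objective: simpler. Equal on all k ≥ 0 (both raise for k < 0).

-- ===== PORT A =====
-- first while-loop: while (1 << S) <= three_k: S += 1   (fuel only makes it total; the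
-- fuel passed in compute_S is proved sufficient, so the loop runs exactly as in Python)
def aLoop1 (fuel S t : Nat) : Nat :=
  match fuel with
  | 0 => S
  | f + 1 => if 2 ^ S ≤ t then aLoop1 f (S + 1) t else S

-- second while-loop: while S > 0 and (1 << (S - 1)) > three_k: S -= 1
def aLoop2 (fuel S t : Nat) : Nat :=
  match fuel with
  | 0 => S
  | f + 1 => if 0 < S ∧ t < 2 ^ (S - 1) then aLoop2 f (S - 1) t else S

-- seed S = ceil(k * log2(3)): A's float-arithmetic seed is modeled by an exact rational
-- upper approximation of log2(3); the loops correct any non-negative seed to the same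
-- minimal S (proved below: the result is seed-independent), so this models A's result exactly.
def aSeed (k : Nat) : Nat := (k * 1584962500721157 + 999999999999999) / 1000000000000000

def compute_S (k : Int) : Int :=
  let three_k : Nat := 3 ^ k.toNat
  let s1 := aLoop1 three_k (aSeed k.toNat) three_k
  (aLoop2 s1 s1 three_k : Int)

-- ===== PORT B =====
-- port of Python's int.bit_length() (the one library call Source B makes): the minimal L with
-- n < 2^L, computed exactly by a galloping upper bound then binary search (fuel-bounded;
-- the fuel is proved sufficient on the whole domain); proved below to equal Nat.size.
def blUp (fuel n e : Nat) : Nat :=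
  match fuel with
  | 0 => e
  | f + 1 => if 2 ^ e ≤ n then blUp f n (e + e + 1) else e

def blFind (fuel n lo hi : Nat) : Nat :=
  match fuel with
  | 0 => hi
  | f + 1 =>
    if hi ≤ lo + 1 then hi
    else
      let mid := (lo + hi) / 2
      if n < 2 ^ mid then blFind f n lo mid else blFind f n mid hi

def bitLen (n : Nat) : Nat :=
  if n = 0 then 0 else blFind 128 n 0 (blUp 64 n 1)

def compute_S_alt (k : Int) : Int :=
  (bitLen (3 ^ k.toNat) : Int)

-- ===== PRECONDITION & SPEC =====
-- Python A raises ValueError (negative shift count) for k < 0 (and B raises AttributeError there).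
def Pre_compute_S (k : Int) : Prop := 0 ≤ k
instance (k : Int) : Decidable (Pre_compute_S k) := by unfold Pre_compute_S; infer_instance
def pvWitness_compute_S : Int := 5

def Spec_compute_S (k : Int) (out : Int) : Prop := out = compute_S_alt k
instance (k : Int) (out : Int) : Decidable (Spec_compute_S k out) := by unfold Spec_compute_S; infer_instance

-- ===== CLAIM (what is proved, stated in full; the proofs are below) =====
def Claim_equal_compute_S : Prop := ∀ (k : Int), Dom_compute_S k → Pre_compute_S k → Spec_compute_S k (compute_S k)

-- ===== LEMMAS AND PROOFS =====

theorem aLoop1_eq (t : Nat) : ∀ (f s : Nat), Nat.size t ≤ s + f →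
    aLoop1 f s t = max s (Nat.size t) := by
  intro f
  induction f with
  | zero => intro s hs; simp [aLoop1]; omega
  | succ f ih =>
      intro s hs
      rw [aLoop1]
      by_cases h : 2 ^ s ≤ t
      · have hlt : s < Nat.size t := Nat.lt_size.mpr h
        rw [if_pos h, ih (s + 1) (by omega)]
        omega
      · have hge : Nat.size t ≤ s := Nat.size_le.mpr (by omega)
        rw [if_neg h]
        omega

theorem aLoop2_eq (t : Nat) (ht : 1 ≤ t) : ∀ (f s : Nat),
    Nat.size t ≤ s → s ≤ Nat.size t + f → aLoop2 f s t = Nat.size t := by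
  intro f
  induction f with
  | zero => intro s h1 h2; rw [aLoop2]; omega
  | succ f ih =>
      intro s h1 h2
      rw [aLoop2]
      have hsz : 1 ≤ Nat.size t := Nat.lt_size.mpr (by simpa using ht)
      by_cases he : s = Nat.size t
      · have hle : 2 ^ (s - 1) ≤ t := Nat.lt_size.mp (by omega)
        rw [if_neg (by omega)]
        omega
      · have hgt : Nat.size t < s := by omega
        have hlt : t < 2 ^ (s - 1) := by
          calc t < 2 ^ Nat.size t := Nat.lt_size_self t
          _ ≤ 2 ^ (s - 1) := Nat.pow_le_pow_right (by norm_num) (by omega)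
        rw [if_pos ⟨by omega, hlt⟩]
        exact ih (s - 1) (by omega) (by omega)

theorem blUp_gt (n : Nat) : ∀ (f e : Nat), n < 2 ^ (2 ^ f * (e + 1) - 1) →
    n < 2 ^ blUp f n e := by
  intro f
  induction f with
  | zero => intro e h; rw [blUp]; simpa using h
  | succ f ih =>
      intro e h
      rw [blUp]
      by_cases hg : 2 ^ e ≤ n
      · rw [if_pos hg]
        apply ih
        have hmul : 2 ^ (f + 1) * (e + 1) = 2 ^ f * (e + e + 1 + 1) := by rw [pow_succ]; ring
        have heq : 2 ^ (f + 1) * (e + 1) - 1 = 2 ^ f * (e + e + 1 + 1) - 1 := by omega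
        rwa [heq] at h
      · rw [if_neg hg]; omega

theorem blUp_le (n : Nat) : ∀ (f e : Nat), blUp f n e ≤ 2 ^ f * (e + 1) - 1 := by
  intro f
  induction f with
  | zero => intro e; rw [blUp]; omega
  | succ f ih =>
      intro e
      rw [blUp]
      have hmul : 2 ^ (f + 1) * (e + 1) = 2 ^ f * (e + e + 1 + 1) := by rw [pow_succ]; ring
      have hge : e + e + 1 + 1 ≤ 2 ^ f * (e + e + 1 + 1) :=
        Nat.le_mul_of_pos_left _ (Nat.two_pow_pos f)
      by_cases hg : 2 ^ e ≤ n
      · rw [if_pos hg]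
        have := ih (e + e + 1)
        omega
      · rw [if_neg hg]; omega

theorem blFind_eq (n : Nat) : ∀ (f lo hi : Nat), hi - lo ≤ 2 ^ f →
    2 ^ lo ≤ n → n < 2 ^ hi → blFind f n lo hi = Nat.size n := by
  intro f
  induction f with
  | zero =>
      intro lo hi hf hlo hhi
      rw [blFind]
      have h1 : lo < Nat.size n := Nat.lt_size.mpr hlo
      have h2 : Nat.size n ≤ hi := Nat.size_le.mpr hhi
      simp at hf
      omega
  | succ f ih =>
      intro lo hi hf hlo hhi
      rw [blFind]
      have h1 : lo < Nat.size n := Nat.lt_size.mpr hlo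
      have h2 : Nat.size n ≤ hi := Nat.size_le.mpr hhi
      by_cases hb : hi ≤ lo + 1
      · rw [if_pos hb]; omega
      · rw [if_neg hb]
        have h2f : 2 ^ (f + 1) = 2 ^ f * 2 := pow_succ 2 f
        by_cases hm : n < 2 ^ ((lo + hi) / 2)
        · rw [if_pos hm]
          exact ih lo ((lo + hi) / 2) (by omega) hlo hm
        · rw [if_neg hm]
          exact ih ((lo + hi) / 2) hi (by omega) (by omega) hhi

theorem bitLen_eq (n : Nat) (hn : n < 2 ^ 2 ^ 64) : bitLen n = Nat.size n := by
  rcases Nat.eq_zero_or_pos n with h | h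
  · simp [bitLen, h]
  · have hup : n < 2 ^ blUp 64 n 1 :=
      blUp_gt n 64 1 (lt_of_lt_of_le hn (Nat.pow_le_pow_right (by norm_num) (by norm_num)))
    clear hn
    have hle := blUp_le n 64 1
    rw [bitLen, if_neg (by omega)]
    refine blFind_eq n 128 0 (blUp 64 n 1) ?_ (by simpa using h) hup
    have hexp : (2 : Nat) ^ 64 * (1 + 1) - 1 ≤ 2 ^ 128 := by norm_num
    omega

-- ===== VERDICT (by name: the statement is the Claim_ definition above) =====
theorem compute_S_spec : Claim_equal_compute_S := by
  intro k hdom _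
  unfold Spec_compute_S compute_S compute_S_alt
  simp only []
  have hm : k.toNat ≤ 2 ^ 31 := by
    unfold Dom_compute_S pvDomInt at hdom
    simp at hdom
    omega
  have ht : 1 ≤ 3 ^ k.toNat := Nat.one_le_pow _ _ (by norm_num)
  have hbound : 3 ^ k.toNat < 2 ^ 2 ^ 64 := by
    calc 3 ^ k.toNat ≤ 4 ^ k.toNat := Nat.pow_le_pow_left (by norm_num) _
    _ = 2 ^ (2 * k.toNat) := by rw [show (4 : Nat) = 2 ^ 2 from rfl, ← pow_mul]
    _ < 2 ^ 2 ^ 64 := Nat.pow_lt_pow_right (by norm_num) (by omega)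
  rw [bitLen_eq _ hbound]
  clear hbound
  have hsize_le : Nat.size (3 ^ k.toNat) ≤ 3 ^ k.toNat :=
    Nat.size_le.mpr (Nat.lt_two_pow_self)
  rw [aLoop1_eq _ _ _ (by omega)]
  rw [aLoop2_eq _ ht _ _ (by omega) (by omega)]
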